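-- pv_equiv track=rewrite | github.com/topherCantrell/computerarcheology | pysrc/cpu/cpu_6809.py | _does_op_fit
-- ===== SOURCE A (Python) =====
-- def _does_op_fit(g,t):
--     if len(g) != len(t):
--         return False
--     for i in range(len(g)):
--         if t[i].islower():
--             continue
--         if g[i]!=t[i]:
--             return False
--     return True
-- ===== SOURCE B (Python) =====
-- def _does_op_fit(g, t):
--     # Project g through the template: copy the template char at wildcard
--     # (lowercase) slots, substitute g's char elsewhere; then the whole-string
--     # equality masked == t decides the match (no per-position test, no early return).
--     if len(g) != len(t):
--         return False
--     masked = ''.join(ti if ti.islower() else gi for gi, ti in zip(g, t))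
--     return masked == t
-- ===== Notes on version B (the rewrite author's own statement) =====
-- stated objective: alternative
-- what changed: Instead of A's index loop with per-position tests and early returns, B builds the projection of g through the template (template char at lowercase wildcard slots, g's char elsewhere) and decides the match by a single whole-string equality masked == t.
import Mathlib
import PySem

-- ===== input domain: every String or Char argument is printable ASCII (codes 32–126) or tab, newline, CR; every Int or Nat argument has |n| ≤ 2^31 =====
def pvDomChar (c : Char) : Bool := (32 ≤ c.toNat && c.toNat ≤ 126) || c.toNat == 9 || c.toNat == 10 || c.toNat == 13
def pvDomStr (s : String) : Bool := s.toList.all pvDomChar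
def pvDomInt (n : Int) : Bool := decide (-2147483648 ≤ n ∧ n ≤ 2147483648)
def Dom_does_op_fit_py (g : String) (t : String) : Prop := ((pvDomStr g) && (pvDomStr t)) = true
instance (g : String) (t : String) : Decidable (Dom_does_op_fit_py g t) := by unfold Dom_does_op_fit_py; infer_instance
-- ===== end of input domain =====

-- B replaces A's index loop (per-position tests with early returns) by projecting g
-- through the template and deciding the match by one whole-string equality (alternative, same cost).

-- ===== PORT A =====
-- the 'for i in range(len(g))' loop with 'continue' / 'return False' / fall-through 'return True'
def doesOpFitLoop (gs ts : List Char) : List Int → Bool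
  | [] => true
  | i :: rest =>
    if PySem.Chars.islower (PySem.List.pyGetD ts i ' ') then
      doesOpFitLoop gs ts rest
    else if PySem.List.pyGetD gs i ' ' ≠ PySem.List.pyGetD ts i ' ' then
      false
    else
      doesOpFitLoop gs ts rest

def does_op_fit_py (g : String) (t : String) : Bool :=
  if g.toList.length ≠ t.toList.length then false
  else doesOpFitLoop g.toList t.toList (PySem.List.pyRange 0 (g.toList.length : Int) 1)

-- ===== PORT B =====
-- 'tc if tc.islower() else gc' for one zipped pair (gc, tc)
def doesOpFitMask (p : Char × Char) : Char :=
  if PySem.Chars.islower p.2 then p.2 else p.1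

def does_op_fit_py_alt (g : String) (t : String) : Bool :=
  if g.toList.length ≠ t.toList.length then false
  else
    let masked := (g.toList.zip t.toList).map doesOpFitMask
    masked == t.toList

-- ===== PRECONDITION & SPEC =====
def Spec_does_op_fit_py (g : String) (t : String) (out : Bool) : Prop := out = does_op_fit_py_alt g t
instance (g : String) (t : String) (out : Bool) : Decidable (Spec_does_op_fit_py g t out) := by unfold Spec_does_op_fit_py; infer_instance

-- ===== CLAIM (what is proved, stated in full; the proofs are below) =====
def Claim_equal_does_op_fit_py : Prop := ∀ (g : String) (t : String), Dom_does_op_fit_py g t → Spec_does_op_fit_py g t (does_op_fit_py g t)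

-- ===== LEMMAS AND PROOFS =====

lemma doesOpFitLoop_eq (n : Nat) : ∀ (gs ts : List Char), ts.length = gs.length →
    ∀ a : Nat, a + n = gs.length →
    doesOpFitLoop gs ts (PySem.List.pyRange (a : Int) (gs.length : Int) 1) =
      (((gs.drop a).zip (ts.drop a)).map doesOpFitMask == ts.drop a) := by
  induction n with
  | zero =>
    intro gs ts hlen a ha
    have : (gs.length : Int) ≤ (a : Int) := by omega
    rw [PySem.List.pyRange_one_eq_nil this]
    simp [doesOpFitLoop, List.drop_eq_nil_of_le (by omega : gs.length ≤ a),
          List.drop_eq_nil_of_le (by omega : ts.length ≤ a)]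
  | succ n ih =>
    intro gs ts hlen a ha
    have hlt : a < gs.length := by omega
    have hlt' : a < ts.length := by omega
    rw [PySem.List.pyRange_one_cons (by exact_mod_cast hlt)]
    have h1 : PySem.List.pyGetD ts (a : Int) ' ' = ts[a] := by
      rw [PySem.List.pyGetD_natCast]; exact List.getD_eq_getElem ts ' ' hlt'
    have h2 : PySem.List.pyGetD gs (a : Int) ' ' = gs[a] := by
      rw [PySem.List.pyGetD_natCast]; exact List.getD_eq_getElem gs ' ' hlt
    have hrec : doesOpFitLoop gs ts (PySem.List.pyRange ((a : Int) + 1) (gs.length : Int) 1) =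
        (((gs.drop (a+1)).zip (ts.drop (a+1))).map doesOpFitMask == ts.drop (a+1)) := by
      have := ih gs ts hlen (a+1) (by omega)
      rwa [show ((a + 1 : Nat) : Int) = (a : Int) + 1 by push_cast; ring] at this
    have hdg : gs.drop a = gs[a] :: gs.drop (a+1) := List.drop_eq_getElem_cons hlt
    have hdt : ts.drop a = ts[a] :: ts.drop (a+1) := List.drop_eq_getElem_cons hlt'
    rw [doesOpFitLoop, h1, h2, hdg, hdt]
    simp only [List.zip_cons_cons, List.map_cons, List.cons_beq_cons, hrec]
    by_cases hl : PySem.Chars.islower ts[a]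
    · simp [hl, doesOpFitMask]
    · by_cases he : gs[a] = ts[a]
      · simp [hl, he, doesOpFitMask]
      · simp [hl, he, doesOpFitMask]

-- ===== VERDICT (by name: the statement is the Claim_ definition above) =====
theorem does_op_fit_py_spec : Claim_equal_does_op_fit_py := by
  intro g t _
  unfold Spec_does_op_fit_py does_op_fit_py does_op_fit_py_alt
  by_cases hlen : g.toList.length = t.toList.length
  · rw [if_neg (by simp [hlen]), if_neg (by simp [hlen])]
    have h0 := doesOpFitLoop_eq g.toList.length g.toList t.toList hlen.symm 0 (by omega)
    simpa using h0
  · rw [if_pos hlen, if_pos hlen]
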